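-- pv_equiv track=rewrite | github.com/bonetblai/learner-strips | sat/scripts/experiment.py | determine_satisfiability
-- ===== SOURCE A (Python) =====
-- def determine_satisfiability(output_lines):
--     for i in range(1, 1 + len(output_lines)):
--         if output_lines[-i] == "s INDETERMINATE":
--             return "Indet"
--         elif output_lines[-i] == "s UNSATISFIABLE":
--             return "False"
--         elif output_lines[-i] == "s SATISFIABLE":
--             return "True"
--     return "Indet"
-- ===== SOURCE B (Python) =====
-- def determine_satisfiability(output_lines):
--     result = "Indet"
--     for line in output_lines:
--         if line == "s INDETERMINATE":
--             result = "Indet"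
--         elif line == "s UNSATISFIABLE":
--             result = "False"
--         elif line == "s SATISFIABLE":
--             result = "True"
--     return result
-- ===== Notes on version B (the rewrite author's own statement) =====
-- stated objective: alternative
-- what changed: Replaces the backward scan with early return (first match from the end) by a single forward pass keeping an accumulator that the last matching line overwrites.
import Mathlib
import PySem

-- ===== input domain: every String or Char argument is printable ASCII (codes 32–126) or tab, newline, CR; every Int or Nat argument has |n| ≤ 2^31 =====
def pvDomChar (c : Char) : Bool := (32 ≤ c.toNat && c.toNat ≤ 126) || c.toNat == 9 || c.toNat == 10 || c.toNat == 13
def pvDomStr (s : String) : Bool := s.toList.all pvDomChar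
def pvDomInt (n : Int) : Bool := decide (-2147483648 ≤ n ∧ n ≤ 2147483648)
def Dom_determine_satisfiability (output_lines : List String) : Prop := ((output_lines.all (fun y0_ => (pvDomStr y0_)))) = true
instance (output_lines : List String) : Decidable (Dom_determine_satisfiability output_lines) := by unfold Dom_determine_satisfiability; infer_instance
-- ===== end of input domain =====

-- B replaces A's backward scan with early return by one forward fold whose last matching line wins (alternative decomposition, same cost).


-- ===== PORT A =====
-- loop body of A: for each index i (from range(1, 1+len)), inspect output_lines[-i];
-- the 'none' branch is unreachable (i is always in range).
def dsGoA (ls : List String) : List Int → String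
  | [] => "Indet"
  | i :: rest =>
    match PySem.List.pyGet? ls (-i) with
    | none => "Indet"
    | some s =>
      if s = "s INDETERMINATE" then "Indet"
      else if s = "s UNSATISFIABLE" then "False"
      else if s = "s SATISFIABLE" then "True"
      else dsGoA ls rest

def determine_satisfiability (output_lines : List String) : String :=
  dsGoA output_lines (PySem.List.pyRange 1 (1 + (output_lines.length : Int)) 1)

-- ===== PORT B =====
def determine_satisfiability_alt (output_lines : List String) : String :=
  output_lines.foldl
    (fun result line =>
      if line = "s INDETERMINATE" then "Indet"
      else if line = "s UNSATISFIABLE" then "False"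
      else if line = "s SATISFIABLE" then "True"
      else result)
    "Indet"

-- ===== PRECONDITION & SPEC =====
def Spec_determine_satisfiability (output_lines : List String) (out : String) : Prop := out = determine_satisfiability_alt output_lines
instance (output_lines : List String) (out : String) : Decidable (Spec_determine_satisfiability output_lines out) := by unfold Spec_determine_satisfiability; infer_instance

-- ===== CLAIM (what is proved, stated in full; the proofs are below) =====
def Claim_equal_determine_satisfiability : Prop := ∀ (output_lines : List String), Dom_determine_satisfiability output_lines → Spec_determine_satisfiability output_lines (determine_satisfiability output_lines)

-- ===== LEMMAS AND PROOFS =====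

-- first-match scan with default: what A computes on the reversed list
def dsFM : List String → String → String
  | [], d => d
  | s :: t, d =>
    if s = "s INDETERMINATE" then "Indet"
    else if s = "s UNSATISFIABLE" then "False"
    else if s = "s SATISFIABLE" then "True"
    else dsFM t d

def dsStep (r s : String) : String :=
  if s = "s INDETERMINATE" then "Indet"
  else if s = "s UNSATISFIABLE" then "False"
  else if s = "s SATISFIABLE" then "True"
  else r

theorem dsFM_append_singleton (xs : List String) (a d : String) :
    dsFM (xs ++ [a]) d = dsFM xs (dsStep d a) := by
  induction xs with
  | nil => simp [dsFM, dsStep]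
  | cons s t ih => simp [dsFM, ih]

theorem foldl_eq_dsFM_reverse (ls : List String) (d : String) :
    ls.foldl dsStep d = dsFM ls.reverse d := by
  induction ls generalizing d with
  | nil => simp [dsFM]
  | cons a t ih =>
    simp only [List.foldl_cons, List.reverse_cons]
    rw [ih, dsFM_append_singleton]

theorem dsGoA_eq_dsFM (ls : List String) :
    ∀ (d k : Nat), k + d = ls.length →
      dsGoA ls (PySem.List.pyRange ((k : Int) + 1) ((ls.length : Int) + 1) 1) =
        dsFM (ls.reverse.drop k) "Indet" := by
  intro d
  induction d with
  | zero =>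
    intro k hk
    have hk' : k = ls.length := by omega
    subst hk'
    rw [PySem.List.pyRange_one_eq_nil (by omega), List.drop_of_length_le (by simp)]
    simp [dsGoA, dsFM]
  | succ d ih =>
    intro k hk
    have hklt : k < ls.length := by omega
    rw [PySem.List.pyRange_one_cons (by omega)]
    have hidx : -((k : Int) + 1) = -(((k + 1 : Nat) : Int)) := by push_cast; ring
    have hget : PySem.List.pyGet? ls (-((k : Int) + 1)) = ls[ls.length - (k + 1)]? := by
      rw [hidx, PySem.List.pyGet?_neg_natCast ls (k + 1) (by omega) (by omega)]
    have hlen : k < ls.reverse.length := by simpa using hklt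
    have hdrop : ls.reverse.drop k = ls.reverse[k] :: ls.reverse.drop (k + 1) :=
      List.drop_eq_getElem_cons hlen
    have hrev : ls.reverse[k] = ls[ls.length - 1 - k] := List.getElem_reverse hlen
    have hsome : ls[ls.length - (k + 1)]? = some ls.reverse[k] := by
      rw [hrev]
      have : ls.length - (k + 1) = ls.length - 1 - k := by omega
      rw [this, List.getElem?_eq_getElem (by omega)]
    have harg : (k : Int) + 1 + 1 = ((k + 1 : Nat) : Int) + 1 := by push_cast; ring
    simp only [dsGoA, hget, hsome, hdrop, dsFM, harg, ih (k + 1) (by omega)]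

-- ===== VERDICT (by name: the statement is the Claim_ definition above) =====
theorem determine_satisfiability_spec : Claim_equal_determine_satisfiability := by
  intro ls _
  unfold Spec_determine_satisfiability determine_satisfiability determine_satisfiability_alt
  have hmain := dsGoA_eq_dsFM ls ls.length 0 (by omega)
  norm_num at hmain
  rw [show (1 : Int) + (ls.length : Int) = (ls.length : Int) + 1 from by ring, hmain]
  rw [show (fun result line =>
      if line = "s INDETERMINATE" then "Indet"
      else if line = "s UNSATISFIABLE" then "False"
      else if line = "s SATISFIABLE" then "True"
      else result) = dsStep from rfl]
  rw [foldl_eq_dsFM_reverse]
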